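-- pv_equiv track=rewrite | github.com/LeeJeongHwi/Today_Algo | 백준/그리디/20365_블로그2/20365.py | solution
-- ===== SOURCE A (Python) =====
-- def solution(N, problems):
--     color_count = {"R":1, "B":1}
--     for i in range(N):
--         if i < N-1:
--             if problems[i] == problems[i+1]:
--                 continue
--             else:
--                 color_count[problems[i]] += 1
--         else:
--             color_count[problems[i]] += 1
--     return min(color_count.values())
-- ===== SOURCE B (Python) =====
-- def solution(N, problems):
--     # Count maximal runs of equal colors among the first N blocks, then use
--     # that runs of "R" and "B" alternate: min over the two colors of
--     # (1 + runs of that color) equals runs // 2 + 1.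
--     runs = 0
--     prev = None
--     for i in range(N):
--         if problems[i] != prev:
--             runs += 1
--             prev = problems[i]
--     return runs // 2 + 1
-- ===== Notes on version B (the rewrite author's own statement) =====
-- stated objective: simpler
-- what changed: Replaces the per-color dict of run counts plus min(values) by a single total-run counter and the closed form runs//2+1, which equals min(1+R_runs,1+B_runs) because R-runs and B-runs alternate.
import Mathlib
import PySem

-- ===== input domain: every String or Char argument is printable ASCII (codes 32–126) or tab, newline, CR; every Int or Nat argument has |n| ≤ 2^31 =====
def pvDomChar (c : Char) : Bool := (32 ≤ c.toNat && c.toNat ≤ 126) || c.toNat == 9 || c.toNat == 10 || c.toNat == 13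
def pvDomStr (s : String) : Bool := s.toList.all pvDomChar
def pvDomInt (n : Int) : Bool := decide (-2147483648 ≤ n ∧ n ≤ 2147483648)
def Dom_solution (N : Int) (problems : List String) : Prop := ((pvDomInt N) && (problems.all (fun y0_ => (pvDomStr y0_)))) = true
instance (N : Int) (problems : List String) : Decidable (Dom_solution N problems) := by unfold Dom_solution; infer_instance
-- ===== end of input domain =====

-- B replaces A's per-color dict of run counts + min(values) by one total-run counter and
-- the closed form runs//2+1 (valid because R-runs and B-runs alternate); same cost, simpler.

-- ===== PORT A =====
-- color_count[k] += 1 is ported as Dict.modify k 0 (·+1); on a missing key Python raises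
-- KeyError — those inputs are excluded by Pre_solution below.
def solution (N : Int) (problems : List String) : Int :=
  let color_count : PySem.Dict String Int := PySem.Dict.mk [("R", 1), ("B", 1)]
  let color_count :=
    (PySem.List.pyRange 0 N 1).foldl
      (fun d i =>
        if i < N - 1 then
          if PySem.List.pyGetD problems i "" = PySem.List.pyGetD problems (i + 1) "" then d
          else d.modify (PySem.List.pyGetD problems i "") 0 (· + 1)
        else d.modify (PySem.List.pyGetD problems i "") 0 (· + 1))
      color_count
  (PySem.List.min? color_count.values (fun v => v)).getD 0

-- ===== PORT B =====
def solution_alt (N : Int) (problems : List String) : Int :=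
  let st :=
    (PySem.List.pyRange 0 N 1).foldl
      (fun (st : Int × Option String) i =>
        if some (PySem.List.pyGetD problems i "") ≠ st.2
        then (st.1 + 1, some (PySem.List.pyGetD problems i "")) else st)
      ((0 : Int), (none : Option String))
  PySem.Int.floordiv st.1 2 + 1

-- ===== PRECONDITION & SPEC =====
-- Pre_ excludes exactly the inputs where A raises: N > len(problems) (IndexError) and
-- a non-"R"/"B" color among the first N blocks (KeyError).
def Pre_solution (N : Int) (problems : List String) : Prop :=
  N ≤ problems.length ∧ ∀ s ∈ problems.take N.toNat, s = "R" ∨ s = "B"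
instance (N : Int) (problems : List String) : Decidable (Pre_solution N problems) := by
  unfold Pre_solution; infer_instance
def pvWitness_solution : Int × List String := (3, ["R", "R", "B"])

def Spec_solution (N : Int) (problems : List String) (out : Int) : Prop := out = solution_alt N problems
instance (N : Int) (problems : List String) (out : Int) : Decidable (Spec_solution N problems out) := by
  unfold Spec_solution; infer_instance

-- ===== CLAIM (what is proved, stated in full; the proofs are below) =====
def Claim_equal_solution : Prop := ∀ (N : Int) (problems : List String), Dom_solution N problems → Pre_solution N problems → Spec_solution N problems (solution N problems)

-- ===== LEMMAS AND PROOFS =====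

theorem foldl_pyRange_take {α β : Type} (xs : List α) (d : α) (n : Nat) (hn : n ≤ xs.length)
    (f : β → α → β) (init : β) :
    (PySem.List.pyRange 0 (n:Int) 1).foldl (fun acc i => f acc (PySem.List.pyGetD xs i d)) init
      = (xs.take n).foldl f init := by
  rw [PySem.List.pyRange_zero_nat]
  induction n with
  | zero => simp
  | succ m ih =>
    have hm : m < xs.length := by omega
    have ht : xs.take (m + 1) = xs.take m ++ [xs[m]] := by
      rw [List.take_add_one, List.getElem?_eq_getElem hm, Option.toList_some]
    rw [List.range_succ, List.map_append, List.foldl_append, ih (by omega), ht, List.foldl_append]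
    simp [List.getD_eq_getElem?_getD, List.getElem?_eq_getElem hm]

def rcount (c : String) : List String → Int
  | [] => 0
  | [x] => if x = c then 1 else 0
  | x :: y :: t => (if x ≠ y ∧ x = c then 1 else 0) + rcount c (y :: t)


theorem modifyR (r b : Int) :
    (PySem.Dict.mk [("R", r), ("B", b)]).modify "R" 0 (· + 1)
      = PySem.Dict.mk [("R", r + 1), ("B", b)] := rfl

theorem modifyB (r b : Int) :
    (PySem.Dict.mk [("R", r), ("B", b)]).modify "B" 0 (· + 1)
      = PySem.Dict.mk [("R", r), ("B", b + 1)] := rfl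

theorem bridgeA (xs : List String) (n : Nat) (hn : n ≤ xs.length)
    (hall : ∀ s ∈ xs.take n, s = "R" ∨ s = "B") :
    ∀ (k i : Nat), i + k = n → ∀ (r b : Int),
    (PySem.List.pyRange (i : Int) (n : Int) 1).foldl
      (fun d j =>
        if j < (n : Int) - 1 then
          if PySem.List.pyGetD xs j "" = PySem.List.pyGetD xs (j + 1) "" then d
          else d.modify (PySem.List.pyGetD xs j "") 0 (· + 1)
        else d.modify (PySem.List.pyGetD xs j "") 0 (· + 1))
      (PySem.Dict.mk [("R", r), ("B", b)])
    = PySem.Dict.mk [("R", r + rcount "R" ((xs.take n).drop i)),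
                     ("B", b + rcount "B" ((xs.take n).drop i))] := by
  intro k
  induction k with
  | zero =>
    intro i hi r b
    rw [PySem.List.pyRange_one_eq_nil (by omega), List.drop_of_length_le (by simp; omega)]
    simp [rcount]
  | succ m ih =>
    intro i hi r b
    have hilen : i < xs.length := by omega
    have hin : i < n := by omega
    have hgi : PySem.List.pyGetD xs (i : Int) "" = xs[i] :=
      PySem.List.pyGetD_eq_getElem xs "" (by omega) (by exact_mod_cast hilen)
    have hlen : (xs.take n).length = n := by simp; omega
    have hdi : (xs.take n).drop i = xs[i] :: (xs.take n).drop (i + 1) := by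
      rw [List.drop_eq_getElem_cons (by omega)]
      congr 1
      exact List.getElem_take
    have hmem : xs[i] ∈ xs.take n := List.mem_of_mem_drop (by rw [hdi]; exact List.mem_cons_self ..)
    have hcast : ((i : Int) + 1) = ((i + 1 : Nat) : Int) := by omega
    rw [PySem.List.pyRange_one_cons (by exact_mod_cast hin), List.foldl_cons]
    by_cases hlast : i + 1 < n
    · -- not the last index: the branch compares with xs[i+1]
      have hcond : (i : Int) < (n : Int) - 1 := by omega
      have hgi1 : PySem.List.pyGetD xs ((i : Int) + 1) "" = xs[i + 1] := by
        have := PySem.List.pyGetD_eq_getElem xs (i := (i : Int) + 1) ""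
          (by omega) (by omega)
        simpa using this
      have hdi1 : (xs.take n).drop (i + 1) = xs[i + 1] :: (xs.take n).drop (i + 2) := by
        rw [List.drop_eq_getElem_cons (by omega)]
        congr 1
        exact List.getElem_take
      rw [if_pos hcond, hgi, hgi1]
      by_cases heq : xs[i] = xs[i + 1]
      · rw [if_pos heq, hcast, ih (i + 1) (by omega) r b, hdi, hdi1]
        simp [rcount, heq]
      · rw [if_neg heq]
        rcases hall _ hmem with hx | hx <;> rw [hx] at heq ⊢
        · rw [modifyR, hcast, ih (i + 1) (by omega) (r + 1) b, hdi, hdi1]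
          simp [rcount, hx, heq]
          omega
        · rw [modifyB, hcast, ih (i + 1) (by omega) r (b + 1), hdi, hdi1]
          simp [rcount, hx, heq]
          omega
    · -- last index
      have hcond : ¬ ((i : Int) < (n : Int) - 1) := by omega
      have hnil : (xs.take n).drop (i + 1) = [] := List.drop_of_length_le (by omega)
      rw [if_neg hcond, hgi]
      rcases hall _ hmem with hx | hx <;> rw [hx]
      · rw [modifyR, hcast, ih (i + 1) (by omega) (r + 1) b, hdi, hnil]
        simp [rcount, hx]
      · rw [modifyB, hcast, ih (i + 1) (by omega) r (b + 1), hdi, hnil]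
        simp [rcount, hx]

def runsFrom (p : String) : List String → Int
  | [] => 0
  | x :: t => (if x ≠ p then 1 else 0) + runsFrom x t

theorem bfold (t : List String) : ∀ (c : Int) (p : String),
    (t.foldl (fun (st : Int × Option String) x =>
        if some x ≠ st.2 then (st.1 + 1, some x) else st) (c, some p)).1
      = c + runsFrom p t := by
  induction t with
  | nil => intro c p; simp [runsFrom]
  | cons x t ih =>
    intro c p
    have hstep : (if some x ≠ (c, some p).2 then ((c, some p).1 + 1, some x) else (c, some p))
        = if x = p then ((c : Int), some p) else (c + 1, some x) := by
      by_cases hxp : x = p <;> simp [hxp]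
    rw [List.foldl_cons, hstep]
    by_cases hxp : x = p
    · rw [if_pos hxp, ih]
      simp [runsFrom, hxp]
    · rw [if_neg hxp, ih]
      simp [runsFrom, hxp]
      omega

theorem rcount_alt (t : List String) :
    ∀ (x y : String), (x = "R" ∧ y = "B") ∨ (x = "B" ∧ y = "R") →
    (∀ s ∈ t, s = "R" ∨ s = "B") →
    rcount y (x :: t) ≤ rcount x (x :: t) ∧ rcount x (x :: t) ≤ rcount y (x :: t) + 1 := by
  induction t with
  | nil =>
    rintro x y (⟨hx, hy⟩ | ⟨hx, hy⟩) _ <;> subst hx <;> subst hy <;> simp [rcount]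
  | cons z t ih =>
    rintro x y hxy hall
    have hz := hall z (List.mem_cons_self ..)
    have hall' : ∀ s ∈ t, s = "R" ∨ s = "B" := fun s hs => hall s (List.mem_cons_of_mem _ hs)
    by_cases hxz : x = z
    · subst hxz
      have := ih x y hxy hall'
      simp [rcount]
      omega
    · have hzy : z = y := by
        rcases hxy with ⟨hx, hy⟩ | ⟨hx, hy⟩ <;> rcases hz with h | h <;> subst_vars <;> simp_all
      subst hzy
      have := ih z x (by tauto) hall'
      simp [rcount, hxz]
      omega

theorem rcount_sum (t : List String) :
    ∀ x, (x = "R" ∨ x = "B") → (∀ s ∈ t, s = "R" ∨ s = "B") →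
    rcount "R" (x :: t) + rcount "B" (x :: t) = 1 + runsFrom x t := by
  induction t with
  | nil => rintro x (hx | hx) _ <;> subst hx <;> simp [rcount, runsFrom]
  | cons y t ih =>
    rintro x hx hall
    have hy := hall y (List.mem_cons_self ..)
    have hall' : ∀ s ∈ t, s = "R" ∨ s = "B" := fun s hs => hall s (List.mem_cons_of_mem _ hs)
    have := ih y hy hall'
    by_cases hxy : x = y
    · subst hxy
      simp [rcount, runsFrom]
      omega
    · rcases hx with hx | hx <;> rcases hy with hy | hy <;> subst_vars <;>
        simp_all [rcount, runsFrom] <;> omega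

theorem minPair (a b : Int) : (PySem.List.min? [a, b] (fun v => v)).getD 0 = min a b := by
  rw [PySem.List.min?_id_cons]; simp

theorem main (N : Int) (problems : List String)
    (hN : N ≤ problems.length) (hall : ∀ s ∈ problems.take N.toNat, s = "R" ∨ s = "B") :
    solution N problems = solution_alt N problems := by
  by_cases hN0 : N ≤ 0
  · simp only [solution, solution_alt]
    rw [PySem.List.pyRange_one_eq_nil hN0]
    rfl
  · obtain ⟨n, hNn⟩ : ∃ n : Nat, N = (n : Int) := ⟨N.toNat, by omega⟩
    subst hNn
    have hnlen : n ≤ problems.length := by exact_mod_cast hN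
    have hn0 : 0 < n := by omega
    rw [Int.toNat_natCast] at hall
    obtain ⟨x, t', ht⟩ : ∃ x t', problems.take n = x :: t' := by
      cases h : problems.take n with
      | nil =>
        exfalso
        have hlen0 : (problems.take n).length = 0 := by rw [h]; rfl
        rw [List.length_take] at hlen0
        omega
      | cons a l => exact ⟨a, l, rfl⟩
    have hx : x = "R" ∨ x = "B" := hall x (by rw [ht]; exact List.mem_cons_self ..)
    have hallt' : ∀ s ∈ t', s = "R" ∨ s = "B" := fun s hs =>
      hall s (by rw [ht]; exact List.mem_cons_of_mem _ hs)
    simp only [solution, solution_alt]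
    have hb := bridgeA problems n hnlen hall n 0 (by omega) 1 1
    norm_num at hb
    rw [hb]
    rw [foldl_pyRange_take problems "" n hnlen
      (fun (st : Int × Option String) cur =>
        if some cur ≠ st.2 then (st.1 + 1, some cur) else st) ((0 : Int), none)]
    rw [ht, List.foldl_cons]
    rw [show (if some x ≠ (((0 : Int), (none : Option String))).2
        then ((((0 : Int), (none : Option String))).1 + 1, some x)
        else (((0 : Int), (none : Option String)))) = (((1 : Int), some x)) by simp]
    have hbv : (PySem.Dict.mk [("R", (1 : Int) + rcount "R" (x :: t')),
        ("B", (1 : Int) + rcount "B" (x :: t'))]).values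
        = [1 + rcount "R" (x :: t'), 1 + rcount "B" (x :: t')] := by
      simp
    rw [hbv, minPair, bfold t' 1 x]
    have hsum := rcount_sum t' x hx hallt'
    have halt : rcount "B" (x :: t') ≤ rcount "R" (x :: t') ∧
        rcount "R" (x :: t') ≤ rcount "B" (x :: t') + 1 ∨
        rcount "R" (x :: t') ≤ rcount "B" (x :: t') ∧
        rcount "B" (x :: t') ≤ rcount "R" (x :: t') + 1 := by
      rcases hx with h | h
      · left; subst h; exact rcount_alt t' "R" "B" (by tauto) hallt'
      · right; subst h
        have := rcount_alt t' "B" "R" (by tauto) hallt'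
        omega
    rw [PySem.Int.floordiv_eq_ediv_of_pos (by norm_num)]
    omega

-- ===== VERDICT (by name: the statement is the Claim_ definition above) =====
theorem solution_spec : Claim_equal_solution := by
  unfold Claim_equal_solution Spec_solution
  intro N problems _ hpre
  exact main N problems hpre.1 hpre.2
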